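-- pv_equiv track=rewrite | github.com/AlexPav217/BubbleSort | main.py | bubbleSortForCount
-- ===== SOURCE A (Python) =====
-- def bubbleSortForCount(a):
--     count = 0
--     for i in range(len(a) - 1):
--         for j in range(len(a) - i - 1):
--             count += 1
--             if a[j] > a[j + 1]:
--                 a[j], a[j + 1] = a[j + 1], a[j]
--     return(count)
-- ===== SOURCE B (Python) =====
-- def bubbleSortForCount(a):
--     # Bubble sort always performs exactly n*(n-1)//2 comparisons; sort in place via sorted().
--     n = len(a)
--     a[:] = sorted(a)
--     return n * (n - 1) // 2
-- ===== Notes on version B (the rewrite author's own statement) =====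
-- stated objective: faster
-- what changed: Replaced the nested bubble-sort comparison-counting loops with the closed form n*(n-1)//2 (bubble sort's comparison count is input-independent), performing the in-place sort side effect via sorted().
import Mathlib
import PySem

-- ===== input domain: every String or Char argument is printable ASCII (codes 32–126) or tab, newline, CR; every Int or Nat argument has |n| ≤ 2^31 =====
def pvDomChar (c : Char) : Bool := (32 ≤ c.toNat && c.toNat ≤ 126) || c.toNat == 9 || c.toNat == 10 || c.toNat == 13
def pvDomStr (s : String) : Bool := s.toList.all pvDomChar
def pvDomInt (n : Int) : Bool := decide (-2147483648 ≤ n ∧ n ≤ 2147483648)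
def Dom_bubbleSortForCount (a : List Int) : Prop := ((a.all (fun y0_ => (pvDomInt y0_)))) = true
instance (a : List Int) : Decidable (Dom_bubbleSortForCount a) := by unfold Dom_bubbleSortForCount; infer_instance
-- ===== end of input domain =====

-- B replaces the O(n^2) counting loops with the closed form n*(n-1)//2 (bubble sort's
-- comparison count depends only on the length); both A and B sort `a` in place in Python —
-- the equivalence proved here is about the RETURN value only.


-- ===== PORT A =====
-- inner loop body: count += 1; if a[j] > a[j+1]: swap a[j], a[j+1]
def pvInnerStep (st : List Int × Int) (j : Int) : List Int × Int :=
  if PySem.List.pyGetD st.1 j 0 > PySem.List.pyGetD st.1 (j + 1) 0 then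
    (PySem.List.pySetD (PySem.List.pySetD st.1 j (PySem.List.pyGetD st.1 (j + 1) 0)) (j + 1)
       (PySem.List.pyGetD st.1 j 0), st.2 + 1)
  else (st.1, st.2 + 1)

def bubbleSortForCount (a : List Int) : Int :=
  ((PySem.List.pyRange 0 ((a.length : Int) - 1) 1).foldl
    (fun st i =>
      (PySem.List.pyRange 0 ((st.1.length : Int) - i - 1) 1).foldl pvInnerStep st)
    (a, 0)).2

-- ===== PORT B =====
def bubbleSortForCount_alt (a : List Int) : Int :=
  PySem.Int.floordiv ((a.length : Int) * ((a.length : Int) - 1)) 2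

-- ===== PRECONDITION & SPEC =====
def Spec_bubbleSortForCount (a : List Int) (out : Int) : Prop := out = bubbleSortForCount_alt a
instance (a : List Int) (out : Int) : Decidable (Spec_bubbleSortForCount a out) := by unfold Spec_bubbleSortForCount; infer_instance

-- ===== CLAIM (what is proved, stated in full; the proofs are below) =====
def Claim_equal_bubbleSortForCount : Prop := ∀ (a : List Int), Dom_bubbleSortForCount a → Spec_bubbleSortForCount a (bubbleSortForCount a)

-- ===== LEMMAS AND PROOFS =====

-- one inner step preserves the list's length
theorem pvInnerStep_len (st : List Int × Int) (j : Int) :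
    (pvInnerStep st j).1.length = st.1.length := by
  unfold pvInnerStep
  split <;> simp [PySem.List.length_pySetD]

theorem pvInnerStep_cnt (st : List Int × Int) (j : Int) :
    (pvInnerStep st j).2 = st.2 + 1 := by
  unfold pvInnerStep
  split <;> rfl

-- the inner loop adds exactly its trip count and preserves the length
theorem pvInner_foldl (l : List Int) (st : List Int × Int) :
    (l.foldl pvInnerStep st).2 = st.2 + l.length ∧
    (l.foldl pvInnerStep st).1.length = st.1.length := by
  induction l generalizing st with
  | nil => simp
  | cons j l ih =>
    have h := ih (pvInnerStep st j)
    have hc : (pvInnerStep st j).2 = st.2 + 1 := pvInnerStep_cnt st j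
    simp only [List.foldl_cons]
    refine ⟨?_, ?_⟩
    · rw [h.1, hc]; simp; omega
    · rw [h.2, pvInnerStep_len]

-- the outer loop: count grows by Σ inner trip counts; length stays n
theorem pvOuter_foldl (L : List Int) (st : List Int × Int) :
    ((L.foldl (fun st i =>
        (PySem.List.pyRange 0 ((st.1.length : Int) - i - 1) 1).foldl pvInnerStep st) st).2
      = st.2 + (L.map (fun i => ((((st.1.length : Int) - i - 1).toNat : Nat) : Int))).sum) ∧
    ((L.foldl (fun st i =>
        (PySem.List.pyRange 0 ((st.1.length : Int) - i - 1) 1).foldl pvInnerStep st) st).1.length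
      = st.1.length) := by
  induction L generalizing st with
  | nil => simp
  | cons i L ih =>
    simp only [List.foldl_cons, List.map_cons, List.sum_cons]
    set st' := (PySem.List.pyRange 0 ((st.1.length : Int) - i - 1) 1).foldl pvInnerStep st with hst'
    have hin := pvInner_foldl (PySem.List.pyRange 0 ((st.1.length : Int) - i - 1) 1) st
    have h := ih st'
    have hlen : st'.1.length = st.1.length := hin.2
    refine ⟨?_, ?_⟩
    · rw [h.1, hin.1, PySem.List.length_pyRange_one, hlen]
      simp only [sub_zero]
      ring
    · rw [h.2, hlen]

-- Σ_{k<m} (m - k) = m*(m+1)/2, over Int, with the list form used above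
theorem pvSum_range (m : Nat) :
    ((List.range m).map (fun k : Nat => ((m : Int) - (k : Int)))).sum * 2
      = (m : Int) * ((m : Int) + 1) := by
  induction m with
  | zero => simp
  | succ m ih =>
    have hshift : ∀ t : Nat,
        ((List.range t).map (fun k : Nat => (((m + 1 : Nat) : Int) - (k : Int)))).sum
          = ((List.range t).map (fun k : Nat => ((m : Int) - (k : Int)))).sum + t := by
      intro t
      induction t with
      | zero => simp
      | succ n ihn =>
        rw [List.range_succ]
        simp only [List.map_append, List.sum_append, List.map_cons, List.map_nil,
          List.sum_cons, List.sum_nil]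
        rw [ihn]
        push_cast
        ring
    rw [List.range_succ, List.map_append, List.sum_append]
    simp only [List.map_cons, List.map_nil, List.sum_cons, List.sum_nil]
    rw [hshift m]
    push_cast
    push_cast at ih
    nlinarith [ih]

-- ===== VERDICT (by name: the statement is the Claim_ definition above) =====
theorem bubbleSortForCount_spec : Claim_equal_bubbleSortForCount := by
  intro a _
  unfold Spec_bubbleSortForCount bubbleSortForCount bubbleSortForCount_alt
  set n : Int := (a.length : Int) with hn
  have hnn : 0 ≤ n := by positivity
  clear_value n
  have h := (pvOuter_foldl (PySem.List.pyRange 0 (n - 1) 1) (a, 0)).1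
  rw [h]
  have hmain : ((PySem.List.pyRange 0 (n - 1) 1).map
      (fun i => (((n - i - 1).toNat : Nat) : Int))).sum * 2 = n * (n - 1) := by
    rw [PySem.List.pyRange_one, List.map_map]
    simp only [sub_zero]
    have hcong : ∀ k ∈ List.range ((n - 1).toNat),
        ((fun i => (((n - i - 1).toNat : Nat) : Int)) ∘ fun k : Nat => (0 : Int) + k) k
          = (fun k : Nat => (((n - 1).toNat : Nat) : Int) - (k : Int)) k := by
      intro k hk
      simp only [List.mem_range] at hk
      simp only [Function.comp]
      omega
    rw [List.map_congr_left hcong]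
    have hs := pvSum_range (n - 1).toNat
    rcases eq_or_lt_of_le hnn with h0 | h1
    · have hz : (n - 1).toNat = 0 := by omega
      rw [hz]
      simp [← h0]
    · have hm : (((n - 1).toNat : Nat) : Int) = n - 1 := by omega
      rw [hs, hm]
      ring
  have h2 : ((PySem.List.pyRange 0 (n - 1) 1).map
      (fun i => (((n - i - 1).toNat : Nat) : Int))).sum = PySem.Int.floordiv (n * (n - 1)) 2 := by
    rw [← hmain, PySem.Int.floordiv_eq_ediv_of_pos (by norm_num)]
    rw [Int.mul_ediv_cancel _ (by norm_num)]
  dsimp only at h ⊢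
  rw [← hn] at h ⊢
  rw [h2]
  ring
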